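-- pv_equiv track=rewrite | github.com/michaelvic-motus/advent-of-code | 2015/day_3/day3b.py | findHouses
-- ===== SOURCE A (Python) =====
-- def findHouses(path):
--     x = 0; y = 0# Define origin Santa
--
--     # Apply movements
--     locations = ['00']
--     for move in path:
--         if move == '>':
--             x += 1
--         elif move == '<':
--             x -= 1
--         elif move == '^':
--             y += 1
--         elif move == 'v':
--             y -= 1
--
--         locations.append(f'{x}{y}')
--
--     return locations
-- ===== SOURCE B (Python) =====
-- def findHouses(path):
--     # Stateless: the i-th visited house is determined by counting the moves in
--     # the first i characters; no running position is maintained.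
--     def house(p):
--         return f"{p.count('>') - p.count('<')}{p.count('^') - p.count('v')}"
--     return [house(path[:i]) for i in range(len(path) + 1)]
-- ===== Notes on version B (the rewrite author's own statement) =====
-- stated objective: alternative
-- what changed: Replaces A's single pass with a mutating coordinate accumulator by a stateless per-index formulation: each visited house is computed directly from the prefix up to that index by counting the four move characters, with no running state.
import Mathlib
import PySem

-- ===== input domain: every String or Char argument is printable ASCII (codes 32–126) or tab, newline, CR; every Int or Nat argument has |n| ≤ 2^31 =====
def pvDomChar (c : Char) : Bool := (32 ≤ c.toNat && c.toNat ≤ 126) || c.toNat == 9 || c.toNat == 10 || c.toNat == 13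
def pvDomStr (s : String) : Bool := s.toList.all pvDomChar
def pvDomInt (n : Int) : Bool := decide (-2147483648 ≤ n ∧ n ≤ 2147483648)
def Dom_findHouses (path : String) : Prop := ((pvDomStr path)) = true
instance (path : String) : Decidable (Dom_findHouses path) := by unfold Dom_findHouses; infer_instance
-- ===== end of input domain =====

-- B replaces A's single pass with a mutating (x,y) accumulator by a stateless
-- per-index formulation: house i is computed directly from the prefix path[:i]
-- by counting the four move characters (objective: alternative, not faster).

-- ===== PORT A =====
-- the for-loop of A: state (x, y, locations)
def findHousesLoop : List Char → Int → Int → List String → List String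
  | [], _, _, acc => acc
  | move :: rest, x, y, acc =>
    let xy : Int × Int :=
      if move = '>' then (x + 1, y)
      else if move = '<' then (x - 1, y)
      else if move = '^' then (x, y + 1)
      else if move = 'v' then (x, y - 1)
      else (x, y)
    findHousesLoop rest xy.1 xy.2 (acc ++ [PySem.Int.toStr xy.1 ++ PySem.Int.toStr xy.2])

def findHouses (path : String) : List String :=
  findHousesLoop path.toList 0 0 ["00"]

-- ===== PORT B =====
-- Source B's helper house(p): format the counts of the prefix p
def pvHouse (p : String) : String :=
  PySem.Int.toStr ((PySem.Str.count p ">" : Int) - (PySem.Str.count p "<" : Int)) ++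
  PySem.Int.toStr ((PySem.Str.count p "^" : Int) - (PySem.Str.count p "v" : Int))

def findHouses_alt (path : String) : List String :=
  (PySem.List.pyRange 0 ((PySem.Str.len path : Int) + 1) 1).map
    (fun i => pvHouse (PySem.Str.slice path none (some i)))

-- ===== PRECONDITION & SPEC =====
def Spec_findHouses (path : String) (out : List String) : Prop := out = findHouses_alt path
instance (path : String) (out : List String) : Decidable (Spec_findHouses path out) := by unfold Spec_findHouses; infer_instance

-- ===== CLAIM (what is proved, stated in full; the proofs are below) =====
def Claim_equal_findHouses : Prop := ∀ (path : String), Dom_findHouses path → Spec_findHouses path (findHouses path)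

-- ===== LEMMAS AND PROOFS =====

def pvDx (p : List Char) : Int := (p.count '>' : Int) - (p.count '<' : Int)
def pvDy (p : List Char) : Int := (p.count '^' : Int) - (p.count 'v' : Int)
def pvFmt (x y : Int) : String := PySem.Int.toStr x ++ PySem.Int.toStr y

-- Python's single-character str.count is List.count
theorem count_go_single (c : Char) (l : List Char) : ∀ (fuel acc : Nat), l.length ≤ fuel →
    PySem.Chars.count.go [c] fuel l acc = acc + l.count c := by
  induction l with
  | nil =>
    intro fuel acc _
    cases fuel <;> simp [PySem.Chars.count.go]
  | cons h t ih =>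
    intro fuel acc hle
    simp only [List.length_cons] at hle
    cases fuel with
    | zero => omega
    | succ f =>
      rw [PySem.Chars.count.go]
      have hbeq : ((c == h) = true) ↔ h = c := by
        constructor
        · intro hh; exact (beq_iff_eq.mp hh).symm
        · intro hh; exact beq_iff_eq.mpr hh.symm
      by_cases hc : h = c
      · subst hc
        simp only [List.isPrefixOf, beq_self_eq_true, Bool.true_and,
          if_true, List.length_cons, List.length_nil,
          List.drop_succ_cons, List.drop_zero]
        rw [ih f (acc + 1) (by omega)]
        simp [List.count_cons]
        omega
      · have hpf : ([c].isPrefixOf (h :: t)) = false := by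
          simp [List.isPrefixOf]
          intro hh; exact hc hh.symm
        rw [hpf]
        simp only [Bool.false_eq_true, if_false]
        rw [ih f acc (by omega)]
        have : (c == h) = false := by
          simp; intro hh; exact hc hh.symm
        simp [List.count_cons, this]
        exact hc

theorem chars_count_single (c : Char) (l : List Char) :
    PySem.Chars.count l [c] = l.count c := by
  rw [PySem.Chars.count]
  simpa using count_go_single c l l.length 0 le_rfl

-- pvHouse of a prefix, on the list side
theorem pvHouse_eq (p : List Char) :
    pvHouse (String.ofList p) = pvFmt (pvDx p) (pvDy p) := by
  simp [pvHouse, pvFmt, pvDx, pvDy, PySem.Str.count_eq, chars_count_single]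

-- counts of a cons prefix shift by the move's delta
theorem pvDx_cons (c : Char) (p : List Char) :
    pvDx (c :: p) = (if c = '>' then 1 else if c = '<' then -1 else 0) + pvDx p := by
  simp only [pvDx, List.count_cons]
  by_cases h1 : c = '>'
  · subst h1; simp; ring
  · by_cases h2 : c = '<'
    · subst h2; simp; ring
    · simp [h1, h2]

theorem pvDy_cons (c : Char) (p : List Char) :
    pvDy (c :: p) = (if c = '^' then 1 else if c = 'v' then -1 else 0) + pvDy p := by
  simp only [pvDy, List.count_cons]
  by_cases h1 : c = '^'
  · subst h1; simp; ring
  · by_cases h2 : c = 'v'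
    · subst h2; simp; ring
    · simp [h1, h2]

theorem pvDx_nil : pvDx [] = 0 := rfl
theorem pvDy_nil : pvDy [] = 0 := rfl

-- A's loop in closed form: each appended entry is the prefix-count coordinate
theorem pvLoop_eq (cs : List Char) (x y : Int) (acc : List String) :
    findHousesLoop cs x y acc =
      acc ++ (List.range cs.length).map
        (fun k => pvFmt (x + pvDx (cs.take (k + 1))) (y + pvDy (cs.take (k + 1)))) := by
  induction cs generalizing x y acc with
  | nil => simp [findHousesLoop]
  | cons c rest ih =>
    simp only [findHousesLoop, List.length_cons]
    have hx : (if c = '>' then (x + 1, y)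
        else if c = '<' then (x - 1, y)
        else if c = '^' then (x, y + 1)
        else if c = 'v' then (x, y - 1)
        else (x, y)) =
        (x + (if c = '>' then 1 else if c = '<' then -1 else 0),
         y + (if c = '^' then 1 else if c = 'v' then -1 else 0)) := by
      split_ifs <;> simp_all [Prod.mk.injEq] <;> omega
    rw [hx, ih, List.range_succ_eq_map]
    simp only [List.map_cons, List.map_map]
    simp only [List.take_succ_cons, pvDx_cons, pvDy_cons, List.take_zero, pvDx_nil, pvDy_nil,
      add_zero, List.append_assoc, List.singleton_append, add_assoc]
    simp [pvFmt, Function.comp]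

-- B in closed form over List.range
theorem pvAlt_eq (path : String) :
    findHouses_alt path =
      (List.range (path.toList.length + 1)).map
        (fun k => pvFmt (pvDx (path.toList.take k)) (pvDy (path.toList.take k))) := by
  unfold findHouses_alt
  have hlen : (PySem.Str.len path : Int) + 1 = ((path.toList.length + 1 : Nat) : Int) := by
    simp [PySem.Str.len_eq]
  rw [hlen, PySem.List.pyRange_zero_natCast, List.map_map]
  apply List.map_congr_left
  intro k hk
  simp only [Function.comp]
  have hsl : (PySem.Str.slice path none (some (k : Int))) = String.ofList (path.toList.take k) := by
    apply String.toList_injective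
    simp [PySem.Str.toList_slice, PySem.Chars.slice_eq_listSlice, PySem.List.slice_to_natCast]
  rw [hsl, pvHouse_eq]

theorem findHouses_eq_alt (path : String) : findHouses path = findHouses_alt path := by
  rw [pvAlt_eq]
  show findHousesLoop path.toList 0 0 ["00"] = _
  rw [pvLoop_eq, List.range_succ_eq_map]
  simp only [List.map_cons, List.map_map, List.take_zero, pvDx_nil, pvDy_nil,
    List.singleton_append]
  have h00 : pvFmt 0 0 = "00" := by decide
  rw [h00]
  congr 1
  apply List.map_congr_left
  intro k _
  simp [Function.comp]

-- ===== VERDICT (by name: the statement is the Claim_ definition above) =====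
theorem findHouses_spec : Claim_equal_findHouses := by
  intro path _
  exact findHouses_eq_alt path
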